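-- pv_equiv track=rewrite | github.com/BenjaminDupre/m-b_thesis | PRE-Analysis/scrap_book.py | ties
-- ===== SOURCE A (Python) =====
-- def ties(W):
--     # Count the number k of unique values and store these values in U.
--     W = sorted(W)
--     n = len(W)
--     k = 1
--     U = [W[0]]
--
--     for i in range(1, n):
--         if W[i] != W[i - 1]:
--             k += 1
--             U.append(W[i])
--
--     # Determine the number of replications R
--     R = [0] * k
--
--     for i in range(k):
--         for j in range(n):
--             if U[i] == W[j]:
--                 R[i] += 1
--
--     # Determine the cumulative frequency
--     C = [0] * k
--     C[0] = R[0]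
--
--     for i in range(1, k):
--         C[i] = C[i - 1] + R[i]
--
--     return U, R, C
-- ===== SOURCE B (Python) =====
-- def ties(W):
--     # One linear pass over the sorted list: equal values are adjacent, so each
--     # run extends the last group; cum is the running cumulative frequency.
--     U, R, C = [], [], []
--     cum = 0
--     for x in sorted(W):
--         cum += 1
--         if U and U[-1] == x:
--             R[-1] += 1
--             C[-1] = cum
--         else:
--             U.append(x)
--             R.append(1)
--             C.append(cum)
--     return U, R, C
-- ===== Notes on version B (the rewrite author's own statement) =====
-- stated objective: faster
-- what changed: Replaces A's per-unique-value rescan of the whole list (counting loop over all pairs i,j plus a separate cumulative pass) with a single linear pass over the sorted list that extends or opens a run while keeping a running cumulative count.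
import Mathlib
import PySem

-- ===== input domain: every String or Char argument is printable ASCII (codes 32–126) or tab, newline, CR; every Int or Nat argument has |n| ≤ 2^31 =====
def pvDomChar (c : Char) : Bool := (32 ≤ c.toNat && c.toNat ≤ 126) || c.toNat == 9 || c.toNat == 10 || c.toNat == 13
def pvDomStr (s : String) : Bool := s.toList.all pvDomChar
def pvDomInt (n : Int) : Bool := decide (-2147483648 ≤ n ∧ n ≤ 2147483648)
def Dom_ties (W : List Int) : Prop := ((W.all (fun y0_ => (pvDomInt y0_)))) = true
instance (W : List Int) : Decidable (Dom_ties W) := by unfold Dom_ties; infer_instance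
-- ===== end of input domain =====

-- B replaces A's per-unique-value rescan of the sorted list by a single linear pass
-- that extends or opens a run while keeping a running cumulative count; objective: faster.


-- ===== PORT A =====
def ties (W : List Int) : List Int × List Int × List Int :=
  let Ws := PySem.List.sorted W (fun x => x) false
  let n : Int := Ws.length
  let s := (PySem.List.pyRange 1 n 1).foldl (fun (s : Int × List Int) i =>
      if PySem.List.pyGetD Ws i 0 ≠ PySem.List.pyGetD Ws (i - 1) 0 then
        (s.1 + 1, s.2 ++ [PySem.List.pyGetD Ws i 0])
      else s)
    (1, [PySem.List.pyGetD Ws 0 0])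
  let k := s.1
  let U := s.2
  let R := (PySem.List.pyRange 0 k 1).foldl (fun R i =>
      (PySem.List.pyRange 0 n 1).foldl (fun R j =>
        if PySem.List.pyGetD U i 0 = PySem.List.pyGetD Ws j 0 then
          PySem.List.pySetD R i (PySem.List.pyGetD R i 0 + 1)
        else R) R)
    (PySem.List.pyRepeat [0] k)
  let C := (PySem.List.pyRange 1 k 1).foldl (fun C i =>
      PySem.List.pySetD C i (PySem.List.pyGetD C (i - 1) 0 + PySem.List.pyGetD R i 0))
    (PySem.List.pySetD (PySem.List.pyRepeat [0] k) 0 (PySem.List.pyGetD R 0 0))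
  (U, R, C)

-- ===== PORT B =====
-- loop body of B's single pass over the sorted list (state: U, R, C, running count)
def stepB (s : List Int × List Int × List Int × Int) (x : Int) : List Int × List Int × List Int × Int :=
  let U := s.1; let R := s.2.1; let C := s.2.2.1; let cum := s.2.2.2 + 1
  if U ≠ [] ∧ PySem.List.pyGetD U (-1) 0 = x then
    (U, PySem.List.pySetD R (-1) (PySem.List.pyGetD R (-1) 0 + 1),
     PySem.List.pySetD C (-1) cum, cum)
  else
    (U ++ [x], R ++ [1], C ++ [cum], cum)

def ties_alt (W : List Int) : List Int × List Int × List Int :=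
  let s := (PySem.List.sorted W (fun x => x) false).foldl stepB ([], [], [], 0)
  (s.1, s.2.1, s.2.2.1)

-- ===== PRECONDITION & SPEC =====
-- Pre_ excludes only the empty list, on which A raises IndexError (W[0]).
def Pre_ties (W : List Int) : Prop := W ≠ []
instance (W : List Int) : Decidable (Pre_ties W) := by unfold Pre_ties; infer_instance
def pvWitness_ties : List Int := [2, 1, 2]
def Spec_ties (W : List Int) (out : List Int × List Int × List Int) : Prop := out = ties_alt W
instance (W : List Int) (out : List Int × List Int × List Int) : Decidable (Spec_ties W out) := by unfold Spec_ties; infer_instance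

-- ===== CLAIM (what is proved, stated in full; the proofs are below) =====
def Claim_equal_ties : Prop := ∀ (W : List Int), Dom_ties W → Pre_ties W → Spec_ties W (ties W)

-- ===== LEMMAS AND PROOFS =====
-- Both programs are shown to compute `canon` of the sorted list: the adjacent-deduplicated
-- values, their multiplicities, and the prefix sums of those multiplicities.

def dedupAdjFrom (a : Int) : List Int → List Int
  | [] => []
  | b :: l => if b = a then dedupAdjFrom a l else b :: dedupAdjFrom b l

def dedupAdj : List Int → List Int
  | [] => []
  | a :: l => a :: dedupAdjFrom a l

def countsIn (M : List Int) (U : List Int) : List Int := U.map (fun u => (M.count u : Int))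

def psums (acc : Int) : List Int → List Int
  | [] => []
  | r :: l => (acc + r) :: psums (acc + r) l

theorem mem_dedupAdjFrom {u a : Int} : ∀ {l : List Int}, u ∈ dedupAdjFrom a l → u ∈ l := by
  intro l
  induction l generalizing a with
  | nil => simp [dedupAdjFrom]
  | cons b t ih =>
    simp only [dedupAdjFrom]
    split
    · intro h; exact List.mem_cons_of_mem _ (ih h)
    · intro h
      rcases List.mem_cons.1 h with h | h
      · exact h ▸ List.mem_cons_self
      · exact List.mem_cons_of_mem _ (ih h)

theorem mem_dedupAdj {u : Int} {l : List Int} (h : u ∈ dedupAdj l) : u ∈ l := by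
  cases l with
  | nil => simpa [dedupAdj] using h
  | cons a t =>
    rcases List.mem_cons.1 h with h | h
    · exact h ▸ List.mem_cons_self
    · exact List.mem_cons_of_mem _ (mem_dedupAdjFrom h)

theorem dedupAdj_getLast? : ∀ (a : Int) (l : List Int),
    (a :: dedupAdjFrom a l).getLast? = (a :: l).getLast? := by
  intro a l
  induction l generalizing a with
  | nil => rfl
  | cons b t ih =>
    simp only [dedupAdjFrom]
    by_cases hb : b = a
    · subst hb
      rw [if_pos rfl, ih b, List.getLast?_cons_cons]
    · rw [if_neg hb, List.getLast?_cons_cons, List.getLast?_cons_cons]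
      exact ih b

theorem dedupAdjFrom_append (a : Int) (l : List Int) (x : Int) :
    dedupAdjFrom a (l ++ [x]) =
      if (a :: l).getLast? = some x then dedupAdjFrom a l else dedupAdjFrom a l ++ [x] := by
  induction l generalizing a with
  | nil =>
    simp only [List.nil_append, dedupAdjFrom, List.getLast?_singleton]
    by_cases h : x = a
    · simp [h]
    · simp [h, Ne.symm h]
  | cons b t ih =>
    simp only [List.cons_append, dedupAdjFrom, List.getLast?_cons_cons]
    by_cases hb : b = a
    · simp only [if_pos hb]
      subst hb
      rw [ih b]
    · simp only [if_neg hb]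
      rw [ih b]
      split <;> simp

theorem pairwise_lt_dedupAdjFrom : ∀ (a : Int) (l : List Int),
    (a :: l).Pairwise (· ≤ ·) → (a :: dedupAdjFrom a l).Pairwise (· < ·) := by
  intro a l
  induction l generalizing a with
  | nil => simp [dedupAdjFrom]
  | cons b t ih =>
    intro hp
    rcases List.pairwise_cons.1 hp with ⟨ha, hbt⟩
    simp only [dedupAdjFrom]
    by_cases hb : b = a
    · rw [if_pos hb]
      apply ih
      subst hb
      exact List.pairwise_cons.2 ⟨fun y hy => (List.pairwise_cons.1 hbt).1 y hy, (List.pairwise_cons.1 hbt).2⟩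
    · rw [if_neg hb]
      have hab : a < b := lt_of_le_of_ne (ha b List.mem_cons_self) (fun h => hb h.symm)
      have htl := ih b hbt
      apply List.pairwise_cons.2
      refine ⟨?_, htl⟩
      intro u hu
      rcases List.mem_cons.1 hu with h | h
      · exact h ▸ hab
      · calc a < b := hab
          _ < u := by
            rcases List.pairwise_cons.1 htl with ⟨hblt, _⟩
            exact hblt u h

theorem psums_append (acc : Int) (P : List Int) (z : Int) :
    psums acc (P ++ [z]) = psums acc P ++ [acc + P.sum + z] := by
  induction P generalizing acc with
  | nil => simp [psums]
  | cons r t ih =>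
    simp only [List.cons_append, psums, ih (acc + r), List.sum_cons]
    ring_nf

theorem pySetD_concat (R₀ : List Int) (r v : Int) :
    PySem.List.pySetD (R₀ ++ [r]) (-1) v = R₀ ++ [v] := by
  simp [PySem.List.pySetD, PySem.List.pySet?, PySem.List.pyIdx?]

theorem pyGetD_concat (R₀ : List Int) (r d : Int) :
    PySem.List.pyGetD (R₀ ++ [r]) (-1) d = r := by
  simp [PySem.List.pyGetD, PySem.List.pyGet?, PySem.List.pyIdx?]

theorem countsIn_irrel (L : List Int) (x : Int) (U : List Int) (h : ∀ u ∈ U, u ≠ x) :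
    countsIn (L ++ [x]) U = countsIn L U := by
  unfold countsIn
  apply List.map_congr_left
  intro u hu
  rw [List.count_append, List.count_singleton]
  simp only [beq_iff_eq]
  rw [if_neg (fun hh => h u hu hh.symm)]
  simp


theorem dedupAdj_ne_nil {l : List Int} (h : l ≠ []) : dedupAdj l ≠ [] := by
  cases l with
  | nil => exact absurd rfl h
  | cons a t => simp [dedupAdj]

theorem getLast?_dedupAdj (l : List Int) : (dedupAdj l).getLast? = l.getLast? := by
  cases l with
  | nil => rfl
  | cons a t => exact dedupAdj_getLast? a t

theorem pairwise_lt_dedupAdj {l : List Int} (h : l.Pairwise (· ≤ ·)) :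
    (dedupAdj l).Pairwise (· < ·) := by
  cases l with
  | nil => simp [dedupAdj]
  | cons a t => exact pairwise_lt_dedupAdjFrom a t h

theorem le_getLast_of_sorted : ∀ {L : List Int} {m : Int}, L.Pairwise (· ≤ ·) →
    L.getLast? = some m → ∀ u ∈ L, u ≤ m := by
  intro L
  induction L with
  | nil => simp
  | cons a t ih =>
    intro m hp hm u hu
    cases t with
    | nil =>
      simp at hm hu
      omega
    | cons b t' =>
      rw [List.getLast?_cons_cons] at hm
      rcases List.mem_cons.1 hu with h | h
      · subst h
        have hmem : m ∈ b :: t' := by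
          rcases List.getLast?_eq_some_iff.1 hm with ⟨ys, hys⟩
          rw [hys]
          simp
        exact (List.pairwise_cons.1 hp).1 m hmem
      · exact ih (List.pairwise_cons.1 hp).2 hm u h

theorem mem_of_getLast?_sorted {L : List Int} {m : Int} (hm : L.getLast? = some m) : m ∈ L := by
  rcases List.getLast?_eq_some_iff.1 hm with ⟨ys, hys⟩
  rw [hys]; simp

theorem stepB_eq (U R C : List Int) (cum x : Int) :
    stepB (U, R, C, cum) x =
      if U ≠ [] ∧ PySem.List.pyGetD U (-1) 0 = x then
        (U, PySem.List.pySetD R (-1) (PySem.List.pyGetD R (-1) 0 + 1),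
         PySem.List.pySetD C (-1) (cum + 1), cum + 1)
      else (U ++ [x], R ++ [1], C ++ [cum + 1], cum + 1) := rfl

theorem foldB (L : List Int) (hp : L.Pairwise (· ≤ ·)) :
    L.foldl stepB ([], [], [], 0) =
      (dedupAdj L, countsIn L (dedupAdj L), psums 0 (countsIn L (dedupAdj L)), (L.length : Int))
    ∧ (countsIn L (dedupAdj L)).sum = (L.length : Int) := by
  induction L using List.reverseRecOn with
  | nil => exact ⟨rfl, rfl⟩
  | append_singleton L x ih =>
    have hpL : L.Pairwise (· ≤ ·) := (List.pairwise_append.1 hp).1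
    have hle : ∀ u ∈ L, u ≤ x := by
      intro u hu
      exact (List.pairwise_append.1 hp).2.2 u hu x (List.mem_singleton_self x)
    obtain ⟨hfold, hsum⟩ := ih hpL
    rw [List.foldl_append, hfold]
    cases hL : L with
    | nil =>
      subst hL
      refine ⟨?_, ?_⟩ <;> simp [stepB, dedupAdj, dedupAdjFrom, countsIn, psums]
    | cons a t =>
      rw [← hL]
      have hLnil : L ≠ [] := by rw [hL]; simp
      have hUnil : dedupAdj L ≠ [] := dedupAdj_ne_nil hLnil
      obtain ⟨U₀, ustar, hU⟩ : ∃ U₀ ustar, dedupAdj L = U₀ ++ [ustar] :=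
        ⟨(dedupAdj L).dropLast, (dedupAdj L).getLast hUnil, (List.dropLast_concat_getLast hUnil).symm⟩
      have hustar : L.getLast? = some ustar := by
        rw [← getLast?_dedupAdj, hU, List.getLast?_concat]
      have hult : ∀ u ∈ U₀, u < ustar := by
        have hplt := pairwise_lt_dedupAdj hpL
        rw [hU] at hplt
        rcases List.pairwise_append.1 hplt with ⟨_, _, hcross⟩
        exact fun u hu => hcross u hu ustar (List.mem_singleton_self ustar)
      have hR : countsIn L (dedupAdj L) = countsIn L U₀ ++ [(L.count ustar : Int)] := by
        rw [hU]; unfold countsIn; rw [List.map_append]; rfl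
      have hsum0 : (countsIn L U₀).sum + (L.count ustar : Int) = (L.length : Int) := by
        rw [hR, List.sum_append] at hsum
        simp only [List.sum_cons, List.sum_nil, add_zero] at hsum
        exact hsum
      by_cases hx : ustar = x
      · -- merge: x equals the last (largest) value already in U
        subst hx
        have hcond : (dedupAdj L ≠ [] ∧ PySem.List.pyGetD (dedupAdj L) (-1) 0 = ustar) := by
          refine ⟨hUnil, ?_⟩
          rw [hU]; exact pyGetD_concat U₀ ustar 0
        have hdnew : dedupAdj (L ++ [ustar]) = dedupAdj L := by
          rw [hL]
          simp only [List.cons_append, dedupAdj]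
          rw [dedupAdjFrom_append, if_pos (by rw [← hL, hustar])]
        have hirr : countsIn (L ++ [ustar]) U₀ = countsIn L U₀ :=
          countsIn_irrel L ustar U₀ (fun u hu => ne_of_lt (hult u hu))
        have hcnt : countsIn (L ++ [ustar]) (dedupAdj (L ++ [ustar]))
            = countsIn L U₀ ++ [(L.count ustar : Int) + 1] := by
          rw [hdnew, hU]
          unfold countsIn at hirr ⊢
          rw [List.map_append, hirr]
          congr 1
          simp [List.count_append]
        constructor
        · simp only [List.foldl_cons, List.foldl_nil]
          rw [stepB_eq, if_pos hcond, hcnt, hdnew, hR, pyGetD_concat, pySetD_concat,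
            psums_append, pySetD_concat, psums_append]
          simp only [Prod.mk.injEq]
          refine ⟨trivial, trivial, ?_, ?_⟩
          · rw [show (0:Int) + (countsIn L U₀).sum + ((L.count ustar : Int) + 1)
                = (L.length : Int) + 1 from by linarith [hsum0]]
          · rw [List.length_append, List.length_cons, List.length_nil]
            push_cast
            ring
        · rw [hcnt, List.sum_append, List.length_append, List.length_cons, List.length_nil]
          simp only [List.sum_cons, List.sum_nil, add_zero]
          push_cast
          linarith [hsum0]
      · -- new group: x is strictly larger than everything seen
        have hxL : x ∉ L := by
          intro hmem
          have h1 : x ≤ ustar := le_getLast_of_sorted hpL hustar x hmem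
          have h2 : ustar ≤ x := hle ustar (mem_of_getLast?_sorted hustar)
          exact hx (le_antisymm h2 h1)
        have hcond : ¬ (dedupAdj L ≠ [] ∧ PySem.List.pyGetD (dedupAdj L) (-1) 0 = x) := by
          rintro ⟨_, hlast⟩
          rw [hU, pyGetD_concat] at hlast
          exact hx hlast
        have hdnew : dedupAdj (L ++ [x]) = dedupAdj L ++ [x] := by
          rw [hL]
          simp only [List.cons_append, dedupAdj]
          rw [dedupAdjFrom_append, if_neg (by rw [← hL, hustar]; simpa using fun h => hx h)]
        have hirr : countsIn (L ++ [x]) (dedupAdj L) = countsIn L (dedupAdj L) :=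
          countsIn_irrel L x (dedupAdj L) (fun u hu => fun he => hxL (he ▸ mem_dedupAdj hu))
        have hcnt : countsIn (L ++ [x]) (dedupAdj (L ++ [x]))
            = countsIn L (dedupAdj L) ++ [1] := by
          rw [hdnew]
          unfold countsIn at hirr ⊢
          rw [List.map_append, hirr]
          congr 1
          simp [List.count_append, List.count_eq_zero_of_not_mem hxL]
        constructor
        · simp only [List.foldl_cons, List.foldl_nil]
          rw [stepB_eq, if_neg hcond, hcnt, hdnew, psums_append]
          simp only [Prod.mk.injEq]
          refine ⟨trivial, trivial, ?_, ?_⟩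
          · rw [show (0:Int) + (countsIn L (dedupAdj L)).sum + (1:Int)
                = (L.length : Int) + 1 from by linarith [hsum]]
          · rw [List.length_append, List.length_cons, List.length_nil]
            push_cast
            ring
        · rw [hcnt, List.sum_append, List.length_append, List.length_cons, List.length_nil]
          simp only [List.sum_cons, List.sum_nil, add_zero]
          push_cast
          linarith [hsum]

-- ===== A-side =====

theorem mapPairs (M : List Int) :
    (PySem.List.pyRange 1 (M.length : Int) 1).map
        (fun i => (PySem.List.pyGetD M i 0, PySem.List.pyGetD M (i - 1) 0))
      = (M.drop 1).zip M := by
  apply List.ext_getElem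
  · simp only [List.length_map, PySem.List.length_pyRange_one, List.length_zip,
      List.length_drop]
    omega
  · intro k h1 h2
    have hk : k + 1 < M.length := by
      simp [PySem.List.length_pyRange_one] at h1
      omega
    simp only [List.getElem_map, PySem.List.getElem_pyRange_one]
    rw [show (1 : Int) + (k : Int) = ((k + 1 : Nat) : Int) by push_cast; ring]
    rw [show ((k + 1 : Nat) : Int) - 1 = ((k : Nat) : Int) by push_cast; ring]
    rw [PySem.List.pyGetD_natCast, PySem.List.pyGetD_natCast]
    rw [List.getElem_zip]
    rw [List.getD_eq_getElem _ _ hk, List.getD_eq_getElem _ _ (by omega)]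
    congr 1
    rw [List.getElem_drop]
    congr 1
    omega

theorem zipFold (t : List Int) : ∀ (w k0 : Int) (U0 : List Int),
    (t.zip (w :: t)).foldl
        (fun (s : Int × List Int) p => if p.1 ≠ p.2 then (s.1 + 1, s.2 ++ [p.1]) else s)
        (k0, U0)
      = (k0 + ((dedupAdjFrom w t).length : Int), U0 ++ dedupAdjFrom w t) := by
  induction t with
  | nil => simp [dedupAdjFrom]
  | cons b t' ih =>
    intro w k0 U0
    simp only [List.zip_cons_cons, List.foldl_cons]
    by_cases hb : b = w
    · rw [if_neg (by simp [hb])]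
      rw [ih b k0 U0]
      simp [dedupAdjFrom, hb]
    · rw [if_pos (by simp [hb])]
      rw [ih b (k0 + 1) (U0 ++ [b])]
      simp only [dedupAdjFrom, if_neg hb, Prod.mk.injEq]
      refine ⟨?_, ?_⟩
      · simp only [List.length_cons]
        push_cast
        ring
      · simp

theorem inner_count (u : Int) : ∀ (M R : List Int) (m : Nat), m < R.length →
    M.foldl (fun R w => if u = w then
        PySem.List.pySetD R (m : Int) (PySem.List.pyGetD R (m : Int) 0 + 1) else R) R
      = R.set m (R.getD m 0 + (M.count u : Int)) := by
  intro M
  induction M with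
  | nil =>
    intro R m hm
    simp only [List.foldl_nil, List.count_nil]
    rw [List.getD_eq_getElem _ _ hm]
    simp [List.set_getElem_self]
  | cons w M' ih =>
    intro R m hm
    simp only [List.foldl_cons]
    by_cases hw : u = w
    · rw [if_pos hw]
      rw [PySem.List.pyGetD_natCast, PySem.List.pySetD_natCast]
      rw [ih _ m (by simpa using hm)]
      rw [List.set_set]
      congr 1
      rw [List.getD_eq_getElem _ _ (by simpa using hm)]
      rw [List.getElem_set_self (by simpa using hm)]
      rw [List.count_cons, if_pos (by simp [hw])]
      rw [List.getD_eq_getElem _ _ hm]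
      push_cast
      ring
    · rw [if_neg hw]
      rw [ih _ m hm]
      rw [List.count_cons, if_neg (by simp; exact fun h => hw h.symm)]
      norm_num

theorem outer_fold (M : List Int) (u : Nat → Int) : ∀ (kn : Nat) (R : List Int), kn ≤ R.length →
    (List.range kn).foldl
        (fun R m => M.foldl (fun R w => if u m = w then
            PySem.List.pySetD R (m : Int) (PySem.List.pyGetD R (m : Int) 0 + 1) else R) R)
        R
      = (List.range kn).map (fun m => R.getD m 0 + (M.count (u m) : Int)) ++ R.drop kn := by
  intro kn
  induction kn with
  | zero => intro R _; simp
  | succ j ih =>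
    intro R hR
    rw [List.range_succ, List.foldl_append, List.foldl_cons, List.foldl_nil, ih R (by omega)]
    set P := (List.range j).map (fun m => R.getD m 0 + (M.count (u m) : Int)) with hP
    have hPlen : P.length = j := by simp [hP]
    have hdlen : (R.drop j).length = R.length - j := by simp
    rw [inner_count (u j) M _ j (by simp [hPlen]; omega)]
    have hgd : (P ++ R.drop j).getD j 0 = R.getD j 0 := by
      rw [List.getD_eq_getElem _ _ (by simp [hPlen]; omega),
        List.getD_eq_getElem _ _ (by omega)]
      rw [List.getElem_append_right (by omega)]
      rw [List.getElem_drop]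
      congr 1
      omega
    rw [hgd]
    rw [List.set_append_right _ _ (by omega)]
    rw [hPlen]
    rw [List.map_append, List.map_cons, List.map_nil, List.append_assoc]
    congr 1
    rw [show j - j = 0 from by omega]
    rw [List.drop_eq_getElem_cons (by omega)]
    simp only [List.set_cons_zero, List.singleton_append]

theorem length_psums (a : Int) (l : List Int) : (psums a l).length = l.length := by
  induction l generalizing a with
  | nil => rfl
  | cons r t ih => simp [psums, ih]

theorem getD_psums_last (a : Int) : ∀ (l : List Int), l ≠ [] →
    (psums a l).getD (l.length - 1) 0 = a + l.sum := by
  intro l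
  induction l generalizing a with
  | nil => simp
  | cons r t ih =>
    intro _
    cases ht : t with
    | nil => simp [psums]
    | cons b t' =>
      rw [← ht]
      have htne : t ≠ [] := by rw [ht]; simp
      simp only [psums, List.length_cons, Nat.add_sub_cancel]
      have : (t.length - 1) + 1 = t.length := by
        rw [ht]; simp
      rw [← this, List.getD_cons_succ]
      rw [ih (a + r) htne]
      simp only [List.sum_cons]
      ring

theorem c_fold (R : List Int) (hR : R ≠ []) : ∀ (jn : Nat), jn + 1 ≤ R.length →
    (List.range jn).foldl (fun C j => C.set (j + 1) (C.getD j 0 + R.getD (j + 1) 0))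
        ((List.replicate R.length 0).set 0 (R.getD 0 0))
      = psums 0 (R.take (jn + 1)) ++ List.replicate (R.length - (jn + 1)) 0 := by
  intro jn
  induction jn with
  | zero =>
    intro h
    cases R with
    | nil => simp at hR
    | cons r R' =>
      simp [psums, List.replicate_succ]
  | succ j ih =>
    intro h
    rw [List.range_succ, List.foldl_append, List.foldl_cons, List.foldl_nil, ih (by omega)]
    have htake_ne : R.take (j + 1) ≠ [] := by
      cases R with
      | nil => simp at hR
      | cons r R' => simp
    have hlt : (List.take (j + 1) R).length = j + 1 := by
      rw [List.length_take]
      omega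
    have hPlen : (psums 0 (R.take (j + 1))).length = j + 1 := by
      rw [length_psums, hlt]
    have hgd : (psums 0 (R.take (j + 1)) ++ List.replicate (R.length - (j + 1)) 0).getD j 0
        = 0 + (R.take (j + 1)).sum := by
      rw [List.getD_append _ _ _ _ (by omega)]
      have := getD_psums_last 0 (R.take (j + 1)) htake_ne
      rw [hlt] at this
      simpa using this
    rw [hgd]
    rw [List.set_append_right _ _ (by omega), hPlen]
    rw [show j + 1 - (j + 1) = 0 from by omega]
    have hrep : List.replicate (R.length - (j + 1)) (0 : Int)
        = 0 :: List.replicate (R.length - (j + 2)) 0 := by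
      rw [show R.length - (j + 1) = (R.length - (j + 2)) + 1 from by omega]
      rfl
    rw [hrep, List.set_cons_zero]
    rw [List.getD_eq_getElem _ _ (show j + 1 < R.length from by omega)]
    rw [List.take_succ_eq_append_getElem (show j + 1 < R.length from by omega), psums_append]
    rw [List.append_assoc, List.singleton_append]

theorem c_fold' (R : List Int) (hR : R ≠ []) :
    (PySem.List.pyRange 1 (R.length : Int) 1).foldl
        (fun C i => PySem.List.pySetD C i
          (PySem.List.pyGetD C (i - 1) 0 + PySem.List.pyGetD R i 0))
        (PySem.List.pySetD (List.replicate R.length (0 : Int)) 0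
          (PySem.List.pyGetD R 0 0))
      = psums 0 R := by
  have hlen0 : 1 ≤ R.length := by
    cases R with
    | nil => simp at hR
    | cons r R' => simp
  have hinit : PySem.List.pySetD (List.replicate R.length (0 : Int)) 0
        (PySem.List.pyGetD R 0 0)
      = (List.replicate R.length (0 : Int)).set 0 (R.getD 0 0) := by
    rw [PySem.List.pySetD_of_nonneg _ _ (le_refl 0),
      PySem.List.pyGetD_of_nonneg _ _ (le_refl 0)]
    norm_num
  rw [hinit]
  rw [PySem.List.pyRange_one 1 (R.length : Int)]
  rw [show ((R.length : Int) - 1).toNat = R.length - 1 from by omega]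
  rw [List.foldl_map]
  have hfun : (fun (C : List Int) (j : Nat) => PySem.List.pySetD C (1 + (j : Int))
        (PySem.List.pyGetD C (1 + (j : Int) - 1) 0 + PySem.List.pyGetD R (1 + (j : Int)) 0))
      = fun (C : List Int) (j : Nat) => C.set (j + 1) (C.getD j 0 + R.getD (j + 1) 0) := by
    funext C j
    rw [show (1 : Int) + (j : Int) - 1 = ((j : Nat) : Int) from by push_cast; ring]
    rw [show (1 : Int) + (j : Int) = ((j + 1 : Nat) : Int) from by push_cast; ring]
    rw [PySem.List.pySetD_natCast, PySem.List.pyGetD_natCast, PySem.List.pyGetD_natCast]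
  rw [hfun]
  rw [c_fold R hR (R.length - 1) (by omega)]
  rw [show R.length - 1 + 1 = R.length from by omega]
  simp

theorem ufold (a : Int) (t : List Int) (k0 : Int) (U0 : List Int) :
    (PySem.List.pyRange 1 ((a :: t).length : Int) 1).foldl
        (fun (s : Int × List Int) i =>
          if PySem.List.pyGetD (a :: t) i 0 ≠ PySem.List.pyGetD (a :: t) (i - 1) 0 then
            (s.1 + 1, s.2 ++ [PySem.List.pyGetD (a :: t) i 0])
          else s)
        (k0, U0)
      = (k0 + ((dedupAdjFrom a t).length : Int), U0 ++ dedupAdjFrom a t) := by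
  have hfm := List.foldl_map
    (f := fun (i : Int) => (PySem.List.pyGetD (a :: t) i 0, PySem.List.pyGetD (a :: t) (i - 1) 0))
    (g := fun (s : Int × List Int) (p : Int × Int) =>
      if p.1 ≠ p.2 then (s.1 + 1, s.2 ++ [p.1]) else s)
    (l := PySem.List.pyRange 1 ((a :: t).length : Int) 1) (init := (k0, U0))
  rw [mapPairs (a :: t)] at hfm
  simp only [List.drop_succ_cons, List.drop_zero] at hfm
  exact hfm.symm.trans (zipFold t a k0 U0)

theorem map_range_counts (M U : List Int) :
    (List.range U.length).map (fun m =>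
        (List.replicate U.length (0 : Int)).getD m 0
          + (M.count (PySem.List.pyGetD U (m : Int) 0) : Int))
      = countsIn M U := by
  apply List.ext_getElem
  · simp [countsIn]
  · intro i h1 h2
    simp only [List.getElem_map, List.getElem_range]
    rw [List.getD_replicate _ (by simpa using h1)]
    rw [PySem.List.pyGetD_natCast]
    rw [List.getD_eq_getElem _ _ (by simpa [countsIn] using h2)]
    simp [countsIn]

theorem outer_fold' (M : List Int) (U : List Int) (kn : Nat) (R0 : List Int)
    (h : kn ≤ R0.length) :
    (List.range kn).foldl
        (fun (R : List Int) (m : Nat) => (PySem.List.pyRange 0 (M.length : Int) 1).foldl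
          (fun R j => if PySem.List.pyGetD U (m : Int) 0 = PySem.List.pyGetD M j 0 then
              PySem.List.pySetD R (m : Int) (PySem.List.pyGetD R (m : Int) 0 + 1)
            else R) R)
        R0
      = (List.range kn).map
          (fun m => R0.getD m 0 + (M.count (PySem.List.pyGetD U (m : Int) 0) : Int))
        ++ R0.drop kn := by
  have hfun : (fun (R : List Int) (m : Nat) => (PySem.List.pyRange 0 (M.length : Int) 1).foldl
        (fun R j => if PySem.List.pyGetD U (m : Int) 0 = PySem.List.pyGetD M j 0 then
            PySem.List.pySetD R (m : Int) (PySem.List.pyGetD R (m : Int) 0 + 1)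
          else R) R)
      = fun (R : List Int) (m : Nat) => M.foldl
          (fun R w => if PySem.List.pyGetD U (m : Int) 0 = w then
              PySem.List.pySetD R (m : Int) (PySem.List.pyGetD R (m : Int) 0 + 1)
            else R) R := by
    funext R m
    exact PySem.List.foldl_pyRange_zero_pyGetD' M 0
      (fun R w => if PySem.List.pyGetD U (m : Int) 0 = w then
          PySem.List.pySetD R (m : Int) (PySem.List.pyGetD R (m : Int) 0 + 1)
        else R) R
  rw [hfun]
  exact outer_fold M (fun m => PySem.List.pyGetD U (m : Int) 0) kn R0 h

def canon (M : List Int) : List Int × List Int × List Int :=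
  (dedupAdj M, countsIn M (dedupAdj M), psums 0 (countsIn M (dedupAdj M)))

theorem ties_alt_eq_canon (W : List Int) :
    ties_alt W = canon (PySem.List.sorted W (fun x => x) false) := by
  unfold ties_alt
  rw [(foldB (PySem.List.sorted W (fun x => x) false)
    (PySem.List.sorted_pairwise W (fun x => x))).1]
  rfl

theorem ties_eq_canon (W : List Int) (h : W ≠ []) :
    ties W = canon (PySem.List.sorted W (fun x => x) false) := by
  have hM : PySem.List.sorted W (fun x => x) false ≠ [] := by
    rw [Ne, PySem.List.sorted_eq_nil_iff]
    exact h
  obtain ⟨a, t, hat⟩ : ∃ a t, PySem.List.sorted W (fun x => x) false = a :: t := by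
    cases hs : PySem.List.sorted W (fun x => x) false with
    | nil => exact absurd hs hM
    | cons a t => exact ⟨a, t, rfl⟩
  unfold ties
  rw [hat]
  dsimp only
  -- the first loop: U and k
  rw [show PySem.List.pyGetD (a :: t) 0 0 = a from by rw [PySem.List.pyGetD_of_nonneg _ _ (le_refl 0)]; rfl]
  rw [ufold a t 1 [a]]
  simp only
  -- name the unique values
  have hU : [a] ++ dedupAdjFrom a t = dedupAdj (a :: t) := rfl
  rw [hU]
  set U := dedupAdj (a :: t) with hUdef
  have hkU : (1 : Int) + ((dedupAdjFrom a t).length : Int) = (U.length : Int) := by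
    rw [hUdef]
    simp only [dedupAdj, List.length_cons]
    push_cast
    ring
  rw [hkU]
  -- the counting loops: R
  rw [PySem.List.pyRange_zero_nat U.length, List.foldl_map]
  rw [PySem.List.pyRepeat_singleton, Int.toNat_natCast]
  rw [outer_fold' (a :: t) U U.length (List.replicate U.length 0) (by simp)]
  rw [List.drop_replicate]
  rw [show U.length - U.length = 0 from by omega]
  simp only [List.replicate_zero, List.append_nil]
  rw [map_range_counts (a :: t) U]
  -- the cumulative loop: C
  have hRlen : (countsIn (a :: t) U).length = U.length := by
    simp [countsIn]
  have hRne : countsIn (a :: t) U ≠ [] := by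
    rw [hUdef]
    simp [countsIn, dedupAdj]
  rw [show (U.length : Int) = ((countsIn (a :: t) U).length : Int) from by rw [hRlen]]
  rw [show U.length = (countsIn (a :: t) U).length from hRlen.symm]
  rw [c_fold' (countsIn (a :: t) U) hRne]
  rfl

-- ===== VERDICT (by name: the statement is the Claim_ definition above) =====
theorem ties_spec : Claim_equal_ties := by
  intro W _ hW
  unfold Spec_ties
  rw [ties_eq_canon W hW, ties_alt_eq_canon W]
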